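-- pv_equiv track=rewrite | github.com/bartek-filipiuk/repo-to-cat | app/services/github_service.py | _find_config_file
-- ===== SOURCE A (Python) =====
-- from typing import Dict, List, Optional
--
-- CONFIG_FILES = {
--     "Python": [
--         "requirements.txt",
--         "Pipfile",
--         "pyproject.toml",
--         "setup.py",
--         "poetry.lock",
--     ],
--     "JavaScript": [
--         "package.json",
--         "package-lock.json",
--         "yarn.lock",
--     ],
--     "TypeScript": [
--         "package.json",
--         "tsconfig.json",
--     ],
--     "Go": [
--         "go.mod",
--         "go.sum",
--     ],
--     "Rust": [
--         "Cargo.toml",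
--         "Cargo.lock",
--     ],
--     "Java": [
--         "pom.xml",
--         "build.gradle",
--     ],
--     "Ruby": [
--         "Gemfile",
--         "Gemfile.lock",
--     ],
--     "PHP": [
--         "composer.json",
--         "composer.lock",
--     ],
-- }
--
-- def _find_config_file(file_tree: List[str], language: Optional[str]) -> Optional[str]:
--     """Find a configuration file."""
--     if not language or language not in CONFIG_FILES:
--         return None
--
--     patterns = CONFIG_FILES[language]
--
--     for pattern in patterns:
--         for file_path in file_tree:
--             if file_path == pattern or file_path.endswith(pattern):
--                 return file_path
--
--     return None
-- ===== SOURCE B (Python) =====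
-- from typing import List, Optional
--
-- CONFIG_FILES = {
--     "Python": ["requirements.txt", "Pipfile", "pyproject.toml", "setup.py", "poetry.lock"],
--     "JavaScript": ["package.json", "package-lock.json", "yarn.lock"],
--     "TypeScript": ["package.json", "tsconfig.json"],
--     "Go": ["go.mod", "go.sum"],
--     "Rust": ["Cargo.toml", "Cargo.lock"],
--     "Java": ["pom.xml", "build.gradle"],
--     "Ruby": ["Gemfile", "Gemfile.lock"],
--     "PHP": ["composer.json", "composer.lock"],
-- }
--
--
-- def _match_index(patterns: List[str], file_path: str) -> Optional[int]:
--     """Smallest pattern index that file_path matches, or None."""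
--     for i, pattern in enumerate(patterns):
--         if file_path == pattern or file_path.endswith(pattern):
--             return i
--     return None
--
--
-- def _find_config_file(file_tree: List[str], language: Optional[str]) -> Optional[str]:
--     """Find a configuration file (single file-major pass over file_tree)."""
--     patterns = CONFIG_FILES.get(language) if language else None
--     if patterns is None:
--         return None
--
--     best = None  # (pattern index, file path) of the best match so far
--     for file_path in file_tree:
--         i = _match_index(patterns, file_path)
--         if i is not None and (best is None or i < best[0]):
--             best = (i, file_path)
--
--     return None if best is None else best[1]
-- ===== Notes on version B (the rewrite author's own statement) =====
-- stated objective: alternative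
-- what changed: Replaced A's pattern-major nested loop (rescanning the whole file_tree once per pattern) by a single file-major pass that tracks the best (lowest pattern index, earliest file) match seen so far.
import Mathlib
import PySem

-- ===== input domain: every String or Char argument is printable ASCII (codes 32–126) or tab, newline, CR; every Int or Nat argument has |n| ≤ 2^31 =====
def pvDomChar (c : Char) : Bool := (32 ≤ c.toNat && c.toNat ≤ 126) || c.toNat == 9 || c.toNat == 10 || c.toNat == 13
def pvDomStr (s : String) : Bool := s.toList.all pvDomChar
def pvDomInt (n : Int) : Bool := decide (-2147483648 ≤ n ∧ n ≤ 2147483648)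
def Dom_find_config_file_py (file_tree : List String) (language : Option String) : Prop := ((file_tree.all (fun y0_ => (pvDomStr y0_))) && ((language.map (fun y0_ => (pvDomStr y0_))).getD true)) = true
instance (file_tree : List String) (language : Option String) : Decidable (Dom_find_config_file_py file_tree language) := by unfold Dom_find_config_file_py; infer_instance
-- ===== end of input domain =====

-- B replaces A's pattern-major nested loop by a single file-major pass tracking the
-- best (lowest pattern index, earliest file) match; same return value, proved below.

-- The CONFIG_FILES module constant (a dict str -> list[str]), shared by both programs.
def CONFIG_FILES : PySem.Dict String (List String) :=
  PySem.Dict.ofList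
  [ ("Python", ["requirements.txt", "Pipfile", "pyproject.toml", "setup.py", "poetry.lock"]),
    ("JavaScript", ["package.json", "package-lock.json", "yarn.lock"]),
    ("TypeScript", ["package.json", "tsconfig.json"]),
    ("Go", ["go.mod", "go.sum"]),
    ("Rust", ["Cargo.toml", "Cargo.lock"]),
    ("Java", ["pom.xml", "build.gradle"]),
    ("Ruby", ["Gemfile", "Gemfile.lock"]),
    ("PHP", ["composer.json", "composer.lock"]) ]

-- `file_path == pattern or file_path.endswith(pattern)` (shared by both sources verbatim)
def pvMatch (pattern file_path : String) : Bool :=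
  (file_path == pattern) || PySem.Str.endswith file_path pattern

-- ===== PORT A =====
-- A's nested loop: for pattern in patterns: for file_path in file_tree: return first match.
def aLoop : List String → List String → Option String
  | [], _ => none
  | pattern :: rest, file_tree =>
    match file_tree.find? (fun file_path => pvMatch pattern file_path) with
    | some file_path => some file_path
    | none => aLoop rest file_tree

def find_config_file_py (file_tree : List String) (language : Option String) : Option String :=
  match language with
  | none => none
  | some lang =>
    if lang = "" then none
    else
      match CONFIG_FILES.get? lang with
      | none => none
      | some patterns => aLoop patterns file_tree

-- ===== PORT B =====
-- Source B's helper: smallest pattern index that file_path matches, or None.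
def matchIndex : List String → String → Option Nat
  | [], _ => none
  | pattern :: rest, file_path =>
    if pvMatch pattern file_path then some 0
    else (matchIndex rest file_path).map (· + 1)

-- one step of Source B's loop body, updating `best`
def bStep (patterns : List String) (best : Option (Nat × String)) (file_path : String) :
    Option (Nat × String) :=
  match matchIndex patterns file_path with
  | none => best
  | some i =>
    match best with
    | none => some (i, file_path)
    | some b => if i < b.1 then some (i, file_path) else best

def find_config_file_py_alt (file_tree : List String) (language : Option String) : Option String :=
  match language with
  | none => none
  | some lang =>
    if lang = "" then none
    else
      match CONFIG_FILES.get? lang with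
      | none => none
      | some patterns =>
        match file_tree.foldl (bStep patterns) none with
        | none => none
        | some b => some b.2

-- ===== PRECONDITION & SPEC =====
def Spec_find_config_file_py (file_tree : List String) (language : Option String) (out : Option String) : Prop := out = find_config_file_py_alt file_tree language
instance (file_tree : List String) (language : Option String) (out : Option String) : Decidable (Spec_find_config_file_py file_tree language out) := by unfold Spec_find_config_file_py; infer_instance

-- ===== CLAIM (what is proved, stated in full; the proofs are below) =====
def Claim_equal_find_config_file_py : Prop := ∀ (file_tree : List String) (language : Option String), Dom_find_config_file_py file_tree language → Spec_find_config_file_py file_tree language (find_config_file_py file_tree language)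

-- ===== LEMMAS AND PROOFS =====

-- once the best index is 0 it can never be improved
theorem bStep_zero_fixed (patterns : List String) (f : String) (tree : List String) :
    tree.foldl (bStep patterns) (some (0, f)) = some (0, f) := by
  induction tree with
  | nil => rfl
  | cons g tl ih =>
    simp only [List.foldl_cons]
    have : bStep patterns (some (0, f)) g = some (0, f) := by
      unfold bStep
      cases matchIndex patterns g with
      | none => rfl
      | some i => simp
    rw [this, ih]

-- if no file matches `p`, the fold over (p :: ps) is the fold over ps with all indices shifted
theorem bStep_shift (p : String) (ps : List String) (tree : List String)
    (h : ∀ g ∈ tree, pvMatch p g = false) (acc : Option (Nat × String)) :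
    tree.foldl (bStep (p :: ps)) (acc.map (fun b => (b.1 + 1, b.2))) =
      (tree.foldl (bStep ps) acc).map (fun b => (b.1 + 1, b.2)) := by
  induction tree generalizing acc with
  | nil => rfl
  | cons g tl ih =>
    simp only [List.foldl_cons]
    have hg : pvMatch p g = false := h g (by simp)
    have hstep : bStep (p :: ps) (acc.map (fun b => (b.1 + 1, b.2))) g =
        (bStep ps acc g).map (fun b => (b.1 + 1, b.2)) := by
      have hmi : matchIndex (p :: ps) g = (matchIndex ps g).map (· + 1) := by
        show (if pvMatch p g = true then some 0 else (matchIndex ps g).map (· + 1)) = _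
        rw [hg]; simp
      unfold bStep
      rw [hmi]
      cases matchIndex ps g with
      | none => rfl
      | some i =>
        cases acc with
        | none => rfl
        | some b =>
          simp only [Option.map_some]
          by_cases hib : i < b.1
          · rw [if_pos hib, if_pos (by omega)]; simp
          · rw [if_neg hib, if_neg (by omega)]; simp
    rw [hstep, ih (fun g hg' => h g (by simp [hg']))]

-- the two loops agree for every pattern list and tree
theorem loops_eq (ps : List String) (tree : List String) :
    (match tree.foldl (bStep ps) none with
      | none => none
      | some b => some b.2) = aLoop ps tree := by
  induction ps with
  | nil =>
    have : tree.foldl (bStep []) none = none := by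
      induction tree with
      | nil => rfl
      | cons g tl ih => simpa [bStep, matchIndex] using ih
    simp [this, aLoop]
  | cons p rest ih =>
    unfold aLoop
    cases hfind : tree.find? (fun fp => pvMatch p fp) with
    | none =>
      have hnone : ∀ g ∈ tree, pvMatch p g = false := by
        intro g hg
        have := List.find?_eq_none.mp hfind g hg
        simpa using this
      have := bStep_shift p rest tree hnone none
      simp only [Option.map_none] at this
      rw [this]
      cases h2 : tree.foldl (bStep rest) none with
      | none => simpa [h2] using ih
      | some b => simpa [h2] using ih
    | some f =>
      obtain ⟨hpf, pre, post, htree, hpre⟩ := List.find?_eq_some_iff_append.mp hfind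
      subst htree
      have hpre' : ∀ g ∈ pre, pvMatch p g = false := by
        intro g hg
        have := hpre g hg
        simpa using this
      -- fold over pre from none: either none or an index ≥ 1 (shifted form)
      have hshift := bStep_shift p rest pre hpre' none
      simp only [Option.map_none] at hshift
      simp only [List.foldl_append, List.foldl_cons]
      rw [hshift]
      -- the step at f yields some (0, f) in every case
      have hmi : matchIndex (p :: rest) f = some 0 := by
        unfold matchIndex; rw [hpf]; simp
      have hstep : ∀ acc : Option (Nat × String),
          bStep (p :: rest) (acc.map (fun b => (b.1 + 1, b.2))) f = some (0, f) := by
        intro acc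
        unfold bStep
        rw [hmi]
        cases acc with
        | none => rfl
        | some b => simp
      cases hpref : pre.foldl (bStep rest) none with
      | none => rw [hstep none, bStep_zero_fixed]
      | some b => rw [hstep (some b), bStep_zero_fixed]

-- ===== VERDICT (by name: the statement is the Claim_ definition above) =====
theorem find_config_file_py_spec : Claim_equal_find_config_file_py := by
  intro file_tree language _
  unfold Spec_find_config_file_py find_config_file_py find_config_file_py_alt
  cases language with
  | none => rfl
  | some lang =>
    by_cases hl : lang = ""
    · simp [hl]
    · simp only [if_neg hl]
      cases CONFIG_FILES.get? lang with
      | none => rfl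
      | some patterns => exact (loops_eq patterns file_tree).symm
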